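-- pv_equiv track=rewrite | github.com/cocofee/auto-quota | tools/export_real_eval_set.py | _cap_records_per_province
-- ===== SOURCE A (Python) =====
-- from collections import defaultdict
--
-- def _clean_text(value: object) -> str:
--     return " ".join(str(value or "").strip().split())
--
-- def _interleave_records(records: list[dict]) -> list[dict]:
--     buckets: dict[tuple[str, str], list[dict]] = defaultdict(list)
--     for record in records:
--         key = (
--             _clean_text(record.get("source")),
--             _clean_text(record.get("project_name")),
--         )
--         buckets[key].append(record)
--     ordered_keys = sorted(
--         buckets,
--         key=lambda item: (
--             item[0] != "project_import",
--             item[0],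
--             item[1],
--         ),
--     )
--     merged: list[dict] = []
--     idx = 0
--     while True:
--         emitted = False
--         for key in ordered_keys:
--             bucket = buckets[key]
--             if idx < len(bucket):
--                 merged.append(bucket[idx])
--                 emitted = True
--         if not emitted:
--             break
--         idx += 1
--     return merged
--
-- def _cap_records_per_province(records: list[dict], max_per_province: int | None) -> list[dict]:
--     if max_per_province is None or int(max_per_province) <= 0:
--         return list(records)
--     grouped: dict[str, list[dict]] = defaultdict(list)
--     for record in records:
--         grouped[_clean_text(record.get("province"))].append(record)
--
--     capped: list[dict] = []
--     for province in sorted(grouped):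
--         diversified = _interleave_records(grouped[province])
--         capped.extend(diversified[: int(max_per_province)])
--     return capped
-- ===== SOURCE B (Python) =====
-- def _norm(value):
--     return " ".join(str(value or "").strip().split())
--
--
-- def _round_robin_take(buckets, cap):
--     # Round-robin over the buckets, dropping exhausted buckets each round and
--     # stopping as soon as `cap` records have been taken.
--     taken = []
--     while buckets and cap > len(taken):
--         room = cap - len(taken)
--         if room <= len(buckets):
--             taken.extend(b[0] for b in buckets[:room])
--             break
--         taken.extend(b[0] for b in buckets)
--         buckets = [b[1:] for b in buckets if len(b) > 1]
--     return taken
--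
--
-- def _cap_records_per_province(records, max_per_province):
--     if max_per_province is None or int(max_per_province) <= 0:
--         return list(records)
--     cap = int(max_per_province)
--     by_province = {}
--     for record in records:
--         by_province.setdefault(_norm(record.get("province")), []).append(record)
--     out = []
--     for province in sorted(by_province):
--         buckets = {}
--         for record in by_province[province]:
--             key = (_norm(record.get("source")), _norm(record.get("project_name")))
--             buckets.setdefault(key, []).append(record)
--         order = sorted(buckets, key=lambda k: (k[0] != "project_import", k[0], k[1]))
--         out.extend(_round_robin_take([buckets[k] for k in order], cap))
--     return out
-- ===== Notes on version B (the rewrite author's own statement) =====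
-- stated objective: alternative
-- what changed: A interleaves each province fully by re-scanning every bucket at every index (including exhausted ones) and slices the result afterwards; B round-robins while dropping exhausted buckets each round and stops emitting as soon as the per-province cap is reached.
import Mathlib
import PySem

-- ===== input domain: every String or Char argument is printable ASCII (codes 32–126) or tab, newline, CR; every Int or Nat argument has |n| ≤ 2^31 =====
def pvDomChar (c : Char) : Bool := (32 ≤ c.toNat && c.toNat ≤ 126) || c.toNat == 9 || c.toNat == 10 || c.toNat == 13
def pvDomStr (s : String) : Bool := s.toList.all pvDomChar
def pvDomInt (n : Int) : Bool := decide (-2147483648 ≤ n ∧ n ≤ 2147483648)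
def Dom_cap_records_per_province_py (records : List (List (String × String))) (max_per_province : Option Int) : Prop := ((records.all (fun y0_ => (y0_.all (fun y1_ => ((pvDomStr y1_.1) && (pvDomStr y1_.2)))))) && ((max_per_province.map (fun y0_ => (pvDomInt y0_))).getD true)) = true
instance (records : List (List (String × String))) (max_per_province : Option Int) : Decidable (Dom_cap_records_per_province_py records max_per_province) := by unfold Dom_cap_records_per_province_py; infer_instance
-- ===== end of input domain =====

-- B replaces A's per-index round-robin scan over ALL buckets (re-scanned even when
-- exhausted, then a slice) by a round-robin that drops exhausted buckets each round
-- and stops emitting as soon as the per-province cap is reached (objective: alternative).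

-- ===== PORT A =====
-- _clean_text(value): " ".join(str(value or "").strip().split()); value is None or a str here
def cleanText (value : Option String) : String :=
  PySem.Str.join " " (PySem.Str.split₀ (PySem.Str.strip (value.getD "")))

-- sorted(_, key=lambda item: (item[0] != "project_import", item[0], item[1])):
-- Python's tuple key ported as three stable sorts, rightmost component first
-- (exact for a stable sort; PySem.List.sorted is stable)
def orderKeys (ks : List (String × String)) : List (String × String) :=
  PySem.List.sorted
    (PySem.List.sorted (PySem.List.sorted ks (fun k => k.2)) (fun k => k.1))
    (fun k => decide (k.1 ≠ "project_import"))

-- the 'while True: … for key in ordered_keys: if idx < len(bucket): merged.append(bucket[idx])' loop;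
-- fuel is a totality guard only (one round per idx; enough fuel is supplied at the call site)
def interRounds (fuel : Nat) (bs : List (List (List (String × String)))) (idx : Nat) :
    List (List (String × String)) :=
  match fuel with
  | 0 => []
  | f + 1 =>
    let row := bs.filterMap (fun b => b[idx]?)
    if row = [] then [] else row ++ interRounds f bs (idx + 1)

-- max bucket length, used only to supply enough fuel to interRounds
def maxLenL (bs : List (List (List (String × String)))) : Nat :=
  (bs.map List.length).foldr max 0

-- _interleave_records(records)
def interleaveA (recs : List (List (String × String))) : List (List (String × String)) :=
  let buckets := recs.foldl
    (fun d r => d.modify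
      (cleanText ((PySem.Dict.mk r).get? "source"), cleanText ((PySem.Dict.mk r).get? "project_name"))
      [] (· ++ [r]))
    (PySem.Dict.mk [])
  let ordered := orderKeys buckets.keys
  let bs := ordered.map (fun k => buckets.getD k [])
  interRounds (maxLenL bs + 1) bs 0

def cap_records_per_province_py (records : List (List (String × String))) (max_per_province : Option Int) : List (List (String × String)) :=
  match max_per_province with
  | none => records
  | some m =>
    if m ≤ 0 then records
    else
      let grouped := records.foldl
        (fun d r => d.modify (cleanText ((PySem.Dict.mk r).get? "province")) [] (· ++ [r]))
        (PySem.Dict.mk [])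
      (PySem.List.sorted grouped.keys (fun s => s)).foldl
        (fun capped p => capped ++ PySem.List.slice (interleaveA (grouped.getD p [])) none (some m))
        []

-- ===== PORT B =====
-- _round_robin_take(buckets, cap): the while loop as tail recursion on remaining = cap - len(taken)
def rrTake (buckets : List (List (List (String × String)))) (remaining : Int) :
    List (List (String × String)) :=
  if h : buckets = [] ∨ remaining ≤ 0 then []
  else if remaining ≤ buckets.length then
    (buckets.take remaining.toNat).filterMap (fun b => b[0]?)
  else
    buckets.filterMap (fun b => b[0]?) ++
      rrTake ((buckets.map (List.drop 1)).filter (fun b => b ≠ [])) (remaining - buckets.length)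
termination_by remaining.toNat
decreasing_by
  have hb : buckets ≠ [] := fun hh => h (Or.inl hh)
  have : 1 ≤ buckets.length := List.length_pos_iff.mpr hb
  omega

def cap_records_per_province_py_alt (records : List (List (String × String))) (max_per_province : Option Int) : List (List (String × String)) :=
  match max_per_province with
  | none => records
  | some m =>
    if m ≤ 0 then records
    else
      let by_province := records.foldl
        (fun d r => d.modify (cleanText ((PySem.Dict.mk r).get? "province")) [] (· ++ [r]))
        (PySem.Dict.mk [])
      (PySem.List.sorted by_province.keys (fun s => s)).foldl
        (fun out p =>
          let buckets := (by_province.getD p []).foldl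
            (fun d r => d.modify
              (cleanText ((PySem.Dict.mk r).get? "source"), cleanText ((PySem.Dict.mk r).get? "project_name"))
              [] (· ++ [r]))
            (PySem.Dict.mk [])
          let order := orderKeys buckets.keys
          out ++ rrTake (order.map (fun k => buckets.getD k [])) m)
        []

-- ===== PRECONDITION & SPEC =====
def Spec_cap_records_per_province_py (records : List (List (String × String))) (max_per_province : Option Int) (out : List (List (String × String))) : Prop := out = cap_records_per_province_py_alt records max_per_province
instance (records : List (List (String × String))) (max_per_province : Option Int) (out : List (List (String × String))) : Decidable (Spec_cap_records_per_province_py records max_per_province out) := by unfold Spec_cap_records_per_province_py; infer_instance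

-- ===== CLAIM (what is proved, stated in full; the proofs are below) =====
def Claim_equal_cap_records_per_province_py : Prop := ∀ (records : List (List (String × String))) (max_per_province : Option Int), Dom_cap_records_per_province_py records max_per_province → Spec_cap_records_per_province_py records max_per_province (cap_records_per_province_py records max_per_province)

-- ===== LEMMAS AND PROOFS =====

-- every value stored by the grouping fold is nonempty (it always ends in ++ [r])
theorem grouped_values_ne {κ : Type} [BEq κ] [LawfulBEq κ] [DecidableEq κ]
    (recs : List (List (String × String))) (key : List (String × String) → κ)
    (d : PySem.Dict κ (List (List (String × String))))
    (hd : ∀ k ∈ d.keys, d.getD k [] ≠ []) :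
    ∀ k ∈ (recs.foldl (fun d r => d.modify (key r) [] (· ++ [r])) d).keys,
      (recs.foldl (fun d r => d.modify (key r) [] (· ++ [r])) d).getD k [] ≠ [] := by
  induction recs generalizing d with
  | nil => simpa using hd
  | cons r t ih =>
    intro k hk
    refine ih (d.modify (key r) [] (· ++ [r])) ?_ k hk
    intro k' hk'
    rw [PySem.Dict.getD_modify]
    split_ifs with he
    · simp
    · refine hd k' ?_
      rw [PySem.Dict.keys_modify] at hk'
      rcases (PySem.Dict.mem_keys_insert _ _ _ _).1 hk' with h1 | h1
      · exact absurd h1 he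
      · exact h1

theorem length_le_maxLenL (bs : List (List (List (String × String)))) :
    ∀ b ∈ bs, b.length ≤ maxLenL bs := by
  induction bs with
  | nil => simp
  | cons b t ih =>
    intro c hc
    rcases List.mem_cons.1 hc with rfl | hc
    · simp only [maxLenL, List.map_cons, List.foldr_cons]
      exact Nat.le_max_left _ _
    · have := ih c hc
      simp only [maxLenL, List.map_cons, List.foldr_cons]
      exact le_trans this (Nat.le_max_right _ _)

-- the row read at index idx+1 equals the row read at idx after dropping heads and exhausted buckets
theorem row_shift (bs : List (List (List (String × String)))) (idx : Nat) :
    ((bs.map (List.drop 1)).filter (fun b => b ≠ [])).filterMap (fun b => b[idx]?)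
      = bs.filterMap (fun b => b[idx + 1]?) := by
  induction bs with
  | nil => simp
  | cons b t ih =>
    cases b with
    | nil => simpa using ih
    | cons x u =>
      cases u with
      | nil => simpa using ih
      | cons y v =>
        rw [show ((x :: y :: v) :: t).map (List.drop 1) = (y :: v) :: t.map (List.drop 1)
          from rfl]
        rw [List.filter_cons_of_pos (by simp)]
        rw [List.filterMap_cons, List.filterMap_cons, ih]
        simp only [List.getElem?_cons_succ]

theorem interRounds_shift (f : Nat) (bs : List (List (List (String × String)))) (idx : Nat) :
    interRounds f bs (idx + 1)
      = interRounds f ((bs.map (List.drop 1)).filter (fun b => b ≠ [])) idx := by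
  induction f generalizing idx with
  | zero => rfl
  | succ f ih =>
    simp only [interRounds, row_shift]
    split_ifs with h
    · rfl
    · rw [ih]

theorem filterMap_head_take (bs : List (List (List (String × String)))) (n : Nat)
    (hne : ∀ b ∈ bs, b ≠ []) :
    (bs.take n).filterMap (fun b => b[0]?)
      = (bs.filterMap (fun b => b[0]?)).take n := by
  induction bs generalizing n with
  | nil => simp
  | cons b t ih =>
    cases b with
    | nil => exact absurd rfl (hne [] (by simp))
    | cons x u =>
      cases n with
      | zero => simp
      | succ n =>
        simp only [List.take_succ_cons, List.filterMap_cons, List.getElem?_cons_zero,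
          List.take_succ_cons]
        rw [ih n (fun b hb => hne b (by simp [hb]))]

theorem length_filterMap_head (bs : List (List (List (String × String))))
    (hne : ∀ b ∈ bs, b ≠ []) :
    (bs.filterMap (fun b => b[0]?)).length = bs.length := by
  induction bs with
  | nil => simp
  | cons b t ih =>
    cases b with
    | nil => exact absurd rfl (hne [] (by simp))
    | cons x u =>
      simp only [List.filterMap_cons, List.getElem?_cons_zero, List.length_cons]
      rw [ih (fun b hb => hne b (by simp [hb]))]

-- the core equivalence: truncating A's full interleave at r equals B's capped round-robin
theorem take_interRounds (f : Nat) (bs : List (List (List (String × String)))) (r : Int)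
    (hf : ∀ b ∈ bs, b.length < f) (hne : ∀ b ∈ bs, b ≠ []) (hr : 0 < r) :
    (interRounds f bs 0).take r.toNat = rrTake bs r := by
  induction f generalizing bs r with
  | zero =>
    have hbs : bs = [] := by
      cases bs with
      | nil => rfl
      | cons b t => exact absurd (hf b (by simp)) (by omega)
    subst hbs
    rw [rrTake]
    simp [interRounds]
  | succ f ih =>
    cases hbs : bs with
    | nil =>
      rw [rrTake]
      simp [interRounds]
    | cons b0 t0 =>
      rw [← hbs]
      have hbsne : bs ≠ [] := by simp [hbs]
      have hlen : (bs.filterMap (fun b => b[0]?)).length = bs.length :=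
        length_filterMap_head bs hne
      have hrowne : bs.filterMap (fun b => b[0]?) ≠ [] := by
        intro h
        rw [h] at hlen
        exact hbsne (List.length_eq_zero_iff.mp hlen.symm)
      have hcond : ¬ (bs = [] ∨ r ≤ 0) := not_or.mpr ⟨hbsne, by omega⟩
      have hunfold : interRounds (f + 1) bs 0
          = if bs.filterMap (fun b => b[0]?) = [] then []
            else bs.filterMap (fun b => b[0]?) ++ interRounds f bs 1 := rfl
      rw [rrTake, dif_neg hcond, hunfold, if_neg hrowne, List.take_append]
      by_cases hle : r ≤ (bs.length : Int)
      · rw [if_pos hle]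
        have h0 : r.toNat - (bs.filterMap (fun b => b[0]?)).length = 0 := by
          rw [hlen]; omega
        rw [h0, List.take_zero, List.append_nil, filterMap_head_take bs r.toNat hne]
      · rw [if_neg hle]
        have htk : (bs.filterMap (fun b => b[0]?)).take r.toNat
            = bs.filterMap (fun b => b[0]?) := by
          apply List.take_of_length_le
          omega
        rw [htk]
        congr 1
        rw [interRounds_shift]
        have harg : r.toNat - (bs.filterMap (fun b => b[0]?)).length
            = (r - (bs.length : Int)).toNat := by
          rw [hlen]; omega
        rw [harg]
        apply ih
        · intro b hb
          rcases List.mem_filter.1 hb with ⟨hb1, hb2⟩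
          rcases List.mem_map.1 hb1 with ⟨c, hc, rfl⟩
          have h1 := hf c hc
          have h2 : c.drop 1 ≠ [] := by simpa using hb2
          have h4 : 1 ≤ (c.drop 1).length := List.length_pos_iff.mpr h2
          simp only [List.length_drop] at h4 ⊢
          omega
        · intro b hb
          have := (List.mem_filter.1 hb).2
          simpa using this
        · omega

-- per-province: A's sliced interleave equals B's capped round-robin on the same buckets
theorem province_step (recs : List (List (String × String))) (m : Int) (hm : 0 < m) :
    PySem.List.slice (interleaveA recs) none (some m)
      = rrTake
          ((orderKeys
              ((recs.foldl (fun d r => d.modify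
                  (cleanText ((PySem.Dict.mk r).get? "source"),
                   cleanText ((PySem.Dict.mk r).get? "project_name")) [] (· ++ [r]))
                (PySem.Dict.mk [])).keys)).map
            (fun k =>
              (recs.foldl (fun d r => d.modify
                  (cleanText ((PySem.Dict.mk r).get? "source"),
                   cleanText ((PySem.Dict.mk r).get? "project_name")) [] (· ++ [r]))
                (PySem.Dict.mk [])).getD k []))
          m := by
  rw [PySem.List.slice_to (interleaveA recs) (by omega : (0:Int) ≤ m)]
  unfold interleaveA
  set buckets := recs.foldl (fun d r => d.modify
      (cleanText ((PySem.Dict.mk r).get? "source"),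
       cleanText ((PySem.Dict.mk r).get? "project_name")) [] (· ++ [r]))
    (PySem.Dict.mk []) with hbuckets
  set bs := (orderKeys buckets.keys).map (fun k => buckets.getD k []) with hbs
  have hval : ∀ k ∈ buckets.keys, buckets.getD k [] ≠ [] := by
    rw [hbuckets]
    exact grouped_values_ne recs _ (PySem.Dict.mk []) (by simp [PySem.Dict.keys])
  have hne : ∀ b ∈ bs, b ≠ [] := by
    intro b hb
    rcases List.mem_map.1 hb with ⟨k, hk, rfl⟩
    have hk' : k ∈ buckets.keys := by
      have p1 := (PySem.List.sorted_perm (PySem.List.sorted (PySem.List.sorted buckets.keys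
        (fun k => k.2)) (fun k => k.1)) (fun k => decide (k.1 ≠ "project_import")) false)
      have p2 := (PySem.List.sorted_perm (PySem.List.sorted buckets.keys (fun k => k.2))
        (fun k => k.1) false)
      have p3 := (PySem.List.sorted_perm buckets.keys (fun k => k.2) false)
      exact p3.mem_iff.1 (p2.mem_iff.1 (p1.mem_iff.1 hk))
    exact hval k hk'
  exact take_interRounds (maxLenL bs + 1) bs m
    (fun b hb => Nat.lt_succ_of_le (length_le_maxLenL bs b hb)) hne hm

-- ===== VERDICT (by name: the statement is the Claim_ definition above) =====
theorem cap_records_per_province_py_spec : Claim_equal_cap_records_per_province_py := by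
  intro records max_per_province _
  unfold Spec_cap_records_per_province_py
  unfold cap_records_per_province_py cap_records_per_province_py_alt
  cases max_per_province with
  | none => rfl
  | some m =>
    by_cases hm : m ≤ 0
    · simp [hm]
    · simp only [if_neg hm]
      apply PySem.List.foldl_congr_mem
      intro acc p _
      rw [province_step _ m (by omega)]
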